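-- pv_equiv track=rewrite | github.com/petteriTeikari/deep-biblio-tools | scripts/fix_latex_citations.py | fix_double_parentheses
-- ===== SOURCE A (Python) =====
-- def fix_double_parentheses(content: str) -> str:
--     """Remove parentheses around \\citep commands to avoid double parentheses."""
--     # Fix patterns using string methods
--
--     # Fix (\\citep{key})
--     i = 0
--     while i < len(content):
--         if content[i : i + 7] == "(\\citep":
--             # Find the matching closing brace and parenthesis
--             j = i + 7
--             if j < len(content) and content[j] == "{":
--                 brace_count = 1
--                 k = j + 1
--                 while k < len(content) and brace_count > 0:
--                     if content[k] == "{":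
--                         brace_count += 1
--                     elif content[k] == "}":
--                         brace_count -= 1
--                     k += 1
--
--                 if brace_count == 0 and k < len(content) and content[k] == ")":
--                     # Extract the key
--                     key = content[j + 1 : k - 1]
--                     # Replace the whole pattern
--                     replacement = f"\\citep{{{key}}}"
--                     content = content[:i] + replacement + content[k + 1 :]
--                     i += len(replacement)
--                     continue
--
--         # Fix [\\citep{key}]
--         elif content[i : i + 7] == "[\\citep":
--             j = i + 7
--             if j < len(content) and content[j] == "{":
--                 brace_count = 1
--                 k = j + 1
--                 while k < len(content) and brace_count > 0:
--                     if content[k] == "{":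
--                         brace_count += 1
--                     elif content[k] == "}":
--                         brace_count -= 1
--                     k += 1
--
--                 if brace_count == 0 and k < len(content) and content[k] == "]":
--                     key = content[j + 1 : k - 1]
--                     replacement = f"\\citep{{{key}}}"
--                     content = content[:i] + replacement + content[k + 1 :]
--                     i += len(replacement)
--                     continue
--
--         i += 1
--
--     return content
-- ===== SOURCE B (Python) =====
-- def fix_double_parentheses(content: str) -> str:
--     """Remove parentheses around \\citep commands to avoid double parentheses."""
--     closers = {"(": ")", "[": "]"}
--     n = len(content)
--     parts = []
--     pos = 0  # start of the pending verbatim run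
--     i = 0
--     while i < n:
--         close = closers.get(content[i])
--         if (
--             close is not None
--             and content[i + 1 : i + 7] == "\\citep"
--             and content[i + 7 : i + 8] == "{"
--         ):
--             depth, k = 1, i + 8
--             while k < n and depth > 0:
--                 if content[k] == "{":
--                     depth += 1
--                 elif content[k] == "}":
--                     depth -= 1
--                 k += 1
--             if depth == 0 and k < n and content[k] == close:
--                 parts.append(content[pos:i])      # verbatim text before the opener
--                 parts.append(content[i + 1 : k])  # the \citep{...} span, unwrapped
--                 pos = i = k + 1
--                 continue
--         i += 1
--     parts.append(content[pos:])
--     return "".join(parts)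
-- ===== Notes on version B (the rewrite author's own statement) =====
-- stated objective: faster
-- what changed: B replaces A's repeated in-place string splicing (rebuilding the whole string at every removal and continuing the scan on the rebuilt string) by a single left-to-right scan over the original string that collects verbatim runs and unwrapped \citep{...} spans into a parts list joined once at the end.
import Mathlib
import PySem

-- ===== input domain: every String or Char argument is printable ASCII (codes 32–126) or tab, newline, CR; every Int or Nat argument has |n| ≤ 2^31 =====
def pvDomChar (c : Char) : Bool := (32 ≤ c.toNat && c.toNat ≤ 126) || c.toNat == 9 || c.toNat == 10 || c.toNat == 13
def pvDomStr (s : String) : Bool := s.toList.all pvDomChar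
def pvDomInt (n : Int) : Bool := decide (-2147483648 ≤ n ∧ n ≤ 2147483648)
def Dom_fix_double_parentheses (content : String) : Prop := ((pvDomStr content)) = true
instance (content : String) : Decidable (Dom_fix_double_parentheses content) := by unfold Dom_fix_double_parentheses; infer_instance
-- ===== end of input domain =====

-- B builds the result in one linear pass over the original string instead of A's
-- repeated in-place splicing of the working string; same return value on every input.
-- (fuel is a totality guard only: it always exceeds the loops' step counts)

-- content[a:b] for the nonnegative in-order indices used by both programs (exact there)
def pvSl (cs : List Char) (a b : Nat) : List Char := List.take (b - a) (List.drop a cs)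

-- the inner brace-counting while-loop, identical in A and in B; returns (k, brace_count)
def pvBraceScan (cs : List Char) : Nat → Nat → Nat → Nat × Nat
  | 0, k, depth => (k, depth)
  | fuel + 1, k, depth =>
    if k < cs.length ∧ 0 < depth then
      pvBraceScan cs fuel (k + 1)
        (if cs.getD k ' ' = '{' then depth + 1
         else if cs.getD k ' ' = '}' then depth - 1 else depth)
    else (k, depth)

-- ===== PORT A =====
def pvLoopA : List Char → Nat → Nat → List Char
  | cs, 0, _ => cs
  | cs, fuel + 1, i =>
    if i < cs.length then
      if pvSl cs i (i + 7) = "(\\citep".toList then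
        if i + 7 < cs.length ∧ cs.getD (i + 7) ' ' = '{' then
          let r := pvBraceScan cs (cs.length + 1) (i + 8) 1
          if r.2 = 0 ∧ r.1 < cs.length ∧ cs.getD r.1 ' ' = ')' then
            let key := pvSl cs (i + 8) (r.1 - 1)
            let repl := "\\citep{".toList ++ key ++ ['}']
            pvLoopA (cs.take i ++ repl ++ cs.drop (r.1 + 1)) fuel (i + repl.length)
          else pvLoopA cs fuel (i + 1)
        else pvLoopA cs fuel (i + 1)
      else if pvSl cs i (i + 7) = "[\\citep".toList then
        if i + 7 < cs.length ∧ cs.getD (i + 7) ' ' = '{' then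
          let r := pvBraceScan cs (cs.length + 1) (i + 8) 1
          if r.2 = 0 ∧ r.1 < cs.length ∧ cs.getD r.1 ' ' = ']' then
            let key := pvSl cs (i + 8) (r.1 - 1)
            let repl := "\\citep{".toList ++ key ++ ['}']
            pvLoopA (cs.take i ++ repl ++ cs.drop (r.1 + 1)) fuel (i + repl.length)
          else pvLoopA cs fuel (i + 1)
        else pvLoopA cs fuel (i + 1)
      else pvLoopA cs fuel (i + 1)
    else cs

def fix_double_parentheses (content : String) : String :=
  String.mk (pvLoopA content.toList (content.toList.length + 1) 0)

-- ===== PORT B =====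
def pvCloser (c : Char) : Option Char :=
  if c = '(' then some ')' else if c = '[' then some ']' else none

-- one pass: pos = start of the pending verbatim run, i = scan position
def pvLoopB : List Char → Nat → Nat → Nat → List Char
  | cs, 0, pos, _ => pvSl cs pos cs.length
  | cs, fuel + 1, pos, i =>
    if i < cs.length then
      match pvCloser (cs.getD i ' ') with
      | some cl =>
        if pvSl cs (i + 1) (i + 7) = "\\citep".toList ∧ pvSl cs (i + 7) (i + 8) = ['{'] then
          let r := pvBraceScan cs (cs.length + 1) (i + 8) 1
          if r.2 = 0 ∧ r.1 < cs.length ∧ cs.getD r.1 ' ' = cl then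
            pvSl cs pos i ++ pvSl cs (i + 1) r.1 ++ pvLoopB cs fuel (r.1 + 1) (r.1 + 1)
          else pvLoopB cs fuel pos (i + 1)
        else pvLoopB cs fuel pos (i + 1)
      | none => pvLoopB cs fuel pos (i + 1)
    else pvSl cs pos cs.length

def fix_double_parentheses_alt (content : String) : String :=
  String.mk (pvLoopB content.toList (content.toList.length + 1) 0 0)

-- ===== PRECONDITION & SPEC =====
def Spec_fix_double_parentheses (content : String) (out : String) : Prop := out = fix_double_parentheses_alt content
instance (content : String) (out : String) : Decidable (Spec_fix_double_parentheses content out) := by unfold Spec_fix_double_parentheses; infer_instance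

-- ===== CLAIM (what is proved, stated in full; the proofs are below) =====
def Claim_equal_fix_double_parentheses : Prop := ∀ (content : String), Dom_fix_double_parentheses content → Spec_fix_double_parentheses content (fix_double_parentheses content)

-- ===== LEMMAS AND PROOFS =====

theorem pvGetD_drop (cs : List Char) (a m : Nat) :
    (cs.drop a).getD m ' ' = cs.getD (a + m) ' ' := by
  rw [List.getD_eq_getElem?_getD, List.getD_eq_getElem?_getD, List.getElem?_drop]

theorem pvSl_nil (cs : List Char) (a b : Nat) (h : cs.length ≤ a) : pvSl cs a b = [] := by
  simp [pvSl, List.drop_eq_nil_of_le h]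

theorem pvSl_self (cs : List Char) (a : Nat) : pvSl cs a a = [] := by
  simp [pvSl]

theorem pvSl_length (cs : List Char) (a b : Nat) (hb : b ≤ cs.length) :
    (pvSl cs a b).length = b - a := by
  simp [pvSl]; omega

theorem pvSl_split (cs : List Char) (a b c : Nat) (h1 : a ≤ b) (h2 : b ≤ c) :
    pvSl cs a c = pvSl cs a b ++ pvSl cs b c := by
  unfold pvSl
  rw [show c - a = (b - a) + (c - b) by omega, List.take_add, List.drop_drop,
    show a + (b - a) = b by omega]

theorem pvSl_cons (cs : List Char) (a b : Nat) (ha : a < cs.length) (hab : a < b) :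
    pvSl cs a b = cs.getD a ' ' :: pvSl cs (a + 1) b := by
  unfold pvSl
  rw [List.drop_eq_getElem_cons ha, show b - a = (b - (a + 1)) + 1 by omega,
    List.take_succ_cons, List.getD_eq_getElem cs ' ' ha]

theorem pvSl_singleton (cs : List Char) (a : Nat) (ha : a < cs.length) :
    pvSl cs a (a + 1) = [cs.getD a ' '] := by
  rw [pvSl_cons cs a (a + 1) ha (by omega), pvSl_self]

theorem pvSl_last (cs : List Char) (a : Nat) (h0 : 0 < a) (hlt : a - 1 < cs.length) :
    pvSl cs (a - 1) a = [cs.getD (a - 1) ' '] := by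
  rw [pvSl_cons cs (a - 1) a hlt (by omega), show a - 1 + 1 = a from by omega, pvSl_self]

theorem pvSl_drop (cs : List Char) (a m m' : Nat) :
    pvSl cs (a + m) (a + m') = pvSl (cs.drop a) m m' := by
  unfold pvSl
  rw [List.drop_drop, show a + m' - (a + m) = m' - m by omega]

theorem pvTake_succ (cs : List Char) (i : Nat) (hi : i < cs.length) :
    cs.take (i + 1) = cs.take i ++ [cs.getD i ' '] := by
  rw [List.take_succ, List.getElem?_eq_getElem hi, List.getD_eq_getElem cs ' ' hi]
  rfl

theorem pvWindow_iff (cs : List Char) (i : Nat) (hi : i < cs.length) (c : Char)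
    (rest : List Char) :
    pvSl cs i (i + 7) = c :: rest ↔ cs.getD i ' ' = c ∧ pvSl cs (i + 1) (i + 7) = rest := by
  rw [pvSl_cons cs i (i + 7) hi (by omega)]
  simp

theorem pvBrace_iff (cs : List Char) (i : Nat) :
    pvSl cs (i + 7) (i + 8) = ['{'] ↔ i + 7 < cs.length ∧ cs.getD (i + 7) ' ' = '{' := by
  by_cases h7 : i + 7 < cs.length
  · rw [show i + 8 = (i + 7) + 1 by omega, pvSl_singleton cs (i + 7) h7]
    simp [h7]
  · rw [pvSl_nil cs _ _ (by omega)]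
    simp [h7]

theorem pvBraceScan_ge (cs : List Char) (f k depth : Nat) :
    k ≤ (pvBraceScan cs f k depth).1 := by
  induction f generalizing k depth with
  | zero => simp [pvBraceScan]
  | succ f ih =>
    rw [pvBraceScan]
    split
    · exact le_trans (Nat.le_succ k) (ih (k + 1) _)
    · simp

theorem pvBraceScan_pos (cs : List Char) (f k depth : Nat) (h : 0 < depth)
    (h2 : (pvBraceScan cs f k depth).2 = 0) : k < (pvBraceScan cs f k depth).1 := by
  cases f with
  | zero => simp [pvBraceScan] at h2; omega
  | succ f =>
    by_cases hc : k < cs.length ∧ 0 < depth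
    · rw [pvBraceScan, if_pos hc]
      have := pvBraceScan_ge cs f (k + 1)
        (if cs.getD k ' ' = '{' then depth + 1 else if cs.getD k ' ' = '}' then depth - 1
          else depth)
      omega
    · rw [pvBraceScan, if_neg hc] at h2
      simp at h2; omega

theorem pvBraceScan_last (cs : List Char) (f k depth : Nat) (h : 0 < depth)
    (h2 : (pvBraceScan cs f k depth).2 = 0) :
    cs.getD ((pvBraceScan cs f k depth).1 - 1) ' ' = '}' := by
  induction f generalizing k depth with
  | zero => simp [pvBraceScan] at h2; omega
  | succ f ih =>
    by_cases hc : k < cs.length ∧ 0 < depth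
    · rw [pvBraceScan, if_pos hc] at h2 ⊢
      by_cases hd : (if cs.getD k ' ' = '{' then depth + 1
          else if cs.getD k ' ' = '}' then depth - 1 else depth) = 0
      · have hbr : cs.getD k ' ' = '}' := by
          by_cases h1 : cs.getD k ' ' = '{'
          · rw [if_pos h1] at hd; omega
          · by_cases hb2 : cs.getD k ' ' = '}'
            · exact hb2
            · rw [if_neg h1, if_neg hb2] at hd; omega
        have h1 : ¬ cs.getD k ' ' = '{' := by rw [hbr]; decide
        rw [if_neg h1, if_pos hbr] at hd h2 ⊢
        rw [hd] at h2 ⊢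
        cases f with
        | zero => simpa [pvBraceScan] using hbr
        | succ f => rw [pvBraceScan, if_neg (by simp)]; simpa using hbr
      · exact ih (k + 1) _ (by omega) h2
    · rw [pvBraceScan, if_neg hc] at h2
      simp at h2; omega

theorem pvBraceScan_drop (cs : List Char) (f a m depth : Nat) :
    pvBraceScan cs f (a + m) depth =
      (a + (pvBraceScan (cs.drop a) f m depth).1, (pvBraceScan (cs.drop a) f m depth).2) := by
  induction f generalizing m depth with
  | zero => simp [pvBraceScan]
  | succ f ih =>
    by_cases hc : a + m < cs.length ∧ 0 < depth
    · have hc' : m < (cs.drop a).length ∧ 0 < depth := by simp; omega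
      rw [pvBraceScan, if_pos hc]
      conv_rhs => rw [pvBraceScan, if_pos hc']
      rw [pvGetD_drop, show a + m + 1 = a + (m + 1) by omega]
      exact ih (m + 1) _
    · have hc' : ¬ (m < (cs.drop a).length ∧ 0 < depth) := by simp at hc ⊢; omega
      rw [pvBraceScan, if_neg hc]
      conv_rhs => rw [pvBraceScan, if_neg hc']

theorem pvBraceScan_fuel (cs : List Char) (f1 f2 k depth : Nat)
    (h1 : cs.length - k < f1) (h2 : cs.length - k < f2) :
    pvBraceScan cs f1 k depth = pvBraceScan cs f2 k depth := by
  induction f1 generalizing f2 k depth with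
  | zero => omega
  | succ f1 ih =>
    cases f2 with
    | zero => omega
    | succ f2 =>
      by_cases hc : k < cs.length ∧ 0 < depth
      · rw [pvBraceScan, if_pos hc]
        conv_rhs => rw [pvBraceScan, if_pos hc]
        exact ih f2 (k + 1) _ (by omega) (by omega)
      · rw [pvBraceScan, if_neg hc]
        conv_rhs => rw [pvBraceScan, if_neg hc]

theorem pvLoopA_succ (cs : List Char) (f i : Nat) :
    pvLoopA cs (f + 1) i =
      if i < cs.length then
        if pvSl cs i (i + 7) = "(\\citep".toList then
          if i + 7 < cs.length ∧ cs.getD (i + 7) ' ' = '{' then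
            if (pvBraceScan cs (cs.length + 1) (i + 8) 1).2 = 0 ∧
                (pvBraceScan cs (cs.length + 1) (i + 8) 1).1 < cs.length ∧
                cs.getD (pvBraceScan cs (cs.length + 1) (i + 8) 1).1 ' ' = ')' then
              pvLoopA (cs.take i ++ ("\\citep{".toList ++
                  pvSl cs (i + 8) ((pvBraceScan cs (cs.length + 1) (i + 8) 1).1 - 1) ++ ['}']) ++
                  cs.drop ((pvBraceScan cs (cs.length + 1) (i + 8) 1).1 + 1)) f
                (i + ("\\citep{".toList ++
                  pvSl cs (i + 8) ((pvBraceScan cs (cs.length + 1) (i + 8) 1).1 - 1) ++ ['}']).length)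
            else pvLoopA cs f (i + 1)
          else pvLoopA cs f (i + 1)
        else if pvSl cs i (i + 7) = "[\\citep".toList then
          if i + 7 < cs.length ∧ cs.getD (i + 7) ' ' = '{' then
            if (pvBraceScan cs (cs.length + 1) (i + 8) 1).2 = 0 ∧
                (pvBraceScan cs (cs.length + 1) (i + 8) 1).1 < cs.length ∧
                cs.getD (pvBraceScan cs (cs.length + 1) (i + 8) 1).1 ' ' = ']' then
              pvLoopA (cs.take i ++ ("\\citep{".toList ++
                  pvSl cs (i + 8) ((pvBraceScan cs (cs.length + 1) (i + 8) 1).1 - 1) ++ ['}']) ++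
                  cs.drop ((pvBraceScan cs (cs.length + 1) (i + 8) 1).1 + 1)) f
                (i + ("\\citep{".toList ++
                  pvSl cs (i + 8) ((pvBraceScan cs (cs.length + 1) (i + 8) 1).1 - 1) ++ ['}']).length)
            else pvLoopA cs f (i + 1)
          else pvLoopA cs f (i + 1)
        else pvLoopA cs f (i + 1)
      else cs := rfl

theorem pvLoopB_succ (cs : List Char) (f pos i : Nat) :
    pvLoopB cs (f + 1) pos i =
      if i < cs.length then
        match pvCloser (cs.getD i ' ') with
        | some cl =>
          if pvSl cs (i + 1) (i + 7) = "\\citep".toList ∧ pvSl cs (i + 7) (i + 8) = ['{'] then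
            if (pvBraceScan cs (cs.length + 1) (i + 8) 1).2 = 0 ∧
                (pvBraceScan cs (cs.length + 1) (i + 8) 1).1 < cs.length ∧
                cs.getD (pvBraceScan cs (cs.length + 1) (i + 8) 1).1 ' ' = cl then
              pvSl cs pos i ++ pvSl cs (i + 1) (pvBraceScan cs (cs.length + 1) (i + 8) 1).1 ++
                pvLoopB cs f ((pvBraceScan cs (cs.length + 1) (i + 8) 1).1 + 1)
                  ((pvBraceScan cs (cs.length + 1) (i + 8) 1).1 + 1)
            else pvLoopB cs f pos (i + 1)
          else pvLoopB cs f pos (i + 1)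
        | none => pvLoopB cs f pos (i + 1)
      else pvSl cs pos cs.length := rfl

theorem pvLoopB_prefix (f : Nat) (cs : List Char) (pos i : Nat) (h1 : pos ≤ i)
    (h2 : i ≤ cs.length) (hf : cs.length - i < f) :
    pvLoopB cs f pos i = pvSl cs pos i ++ pvLoopB cs f i i := by
  obtain ⟨f, rfl⟩ : ∃ f', f = f' + 1 := ⟨f - 1, by omega⟩
  by_cases hi : i < cs.length
  · cases hcl : pvCloser (cs.getD i ' ') with
    | none =>
      rw [pvLoopB_succ, pvLoopB_succ, if_pos hi, if_pos hi]
      simp only [hcl]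
      rw [pvLoopB_prefix f cs pos (i + 1) (by omega) (by omega) (by omega),
        pvLoopB_prefix f cs i (i + 1) (by omega) (by omega) (by omega),
        pvSl_split cs pos i (i + 1) h1 (by omega), List.append_assoc]
    | some cl =>
      by_cases hw : pvSl cs (i + 1) (i + 7) = "\\citep".toList ∧ pvSl cs (i + 7) (i + 8) = ['{']
      · by_cases hk : (pvBraceScan cs (cs.length + 1) (i + 8) 1).2 = 0 ∧ (pvBraceScan cs (cs.length + 1) (i + 8) 1).1 < cs.length ∧
            cs.getD (pvBraceScan cs (cs.length + 1) (i + 8) 1).1 ' ' = cl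
        · rw [pvLoopB_succ, pvLoopB_succ, if_pos hi, if_pos hi]
          simp only [hcl, if_pos hw]
          rw [if_pos hk, if_pos hk]
          simp [pvSl_self]
        · rw [pvLoopB_succ, pvLoopB_succ, if_pos hi, if_pos hi]
          simp only [hcl, if_pos hw]
          rw [if_neg hk, if_neg hk,
            pvLoopB_prefix f cs pos (i + 1) (by omega) (by omega) (by omega),
            pvLoopB_prefix f cs i (i + 1) (by omega) (by omega) (by omega),
            pvSl_split cs pos i (i + 1) h1 (by omega), List.append_assoc]
      · rw [pvLoopB_succ, pvLoopB_succ, if_pos hi, if_pos hi]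
        simp only [hcl, if_neg hw]
        rw [pvLoopB_prefix f cs pos (i + 1) (by omega) (by omega) (by omega),
          pvLoopB_prefix f cs i (i + 1) (by omega) (by omega) (by omega),
          pvSl_split cs pos i (i + 1) h1 (by omega), List.append_assoc]
  · rw [pvLoopB_succ, pvLoopB_succ, if_neg hi, if_neg hi,
      ← pvSl_split cs pos i cs.length h1 h2]
termination_by f
decreasing_by all_goals omega


theorem pvLoopB_congr (f : Nat) (cs1 : List Char) (p1 : Nat) (cs2 : List Char) (p2 : Nat)
    (hd : cs1.drop p1 = cs2.drop p2) (hf : cs1.length - p1 < f) :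
    pvLoopB cs1 f p1 p1 = pvLoopB cs2 f p2 p2 := by
  obtain ⟨f, rfl⟩ : ∃ f', f = f' + 1 := ⟨f - 1, by omega⟩
  have hlen : cs1.length - p1 = cs2.length - p2 := by
    have := congrArg List.length hd
    simpa using this
  have hg : ∀ m, cs1.getD (p1 + m) ' ' = cs2.getD (p2 + m) ' ' := by
    intro m
    rw [← pvGetD_drop, ← pvGetD_drop, hd]
  have hsl : ∀ m m', pvSl cs1 (p1 + m) (p1 + m') = pvSl cs2 (p2 + m) (p2 + m') := by
    intro m m'
    rw [pvSl_drop, pvSl_drop, hd]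
  by_cases h1 : p1 < cs1.length
  · have h2 : p2 < cs2.length := by omega
    have hgp : cs1.getD p1 ' ' = cs2.getD p2 ' ' := by
      have := hg 0
      simpa using this
    have hd' : cs1.drop (p1 + 1) = cs2.drop (p2 + 1) := by
      have hc := congrArg (List.drop 1) hd
      rw [List.drop_drop, List.drop_drop] at hc
      exact hc
    rw [pvLoopB_succ, pvLoopB_succ, if_pos h1, if_pos h2, hgp]
    cases hcl : pvCloser (cs2.getD p2 ' ') with
    | none =>
      simp only [hcl]
      rw [pvLoopB_prefix f cs1 p1 (p1 + 1) (by omega) (by omega) (by omega),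
        pvLoopB_prefix f cs2 p2 (p2 + 1) (by omega) (by omega) (by omega)]
      have hone : pvSl cs1 p1 (p1 + 1) = pvSl cs2 p2 (p2 + 1) := by
        have := hsl 0 1
        simpa using this
      rw [hone, pvLoopB_congr f cs1 (p1 + 1) cs2 (p2 + 1) hd' (by omega)]
    | some cl =>
      simp only [hcl]
      have hw1 : pvSl cs1 (p1 + 1) (p1 + 7) = pvSl cs2 (p2 + 1) (p2 + 7) := hsl 1 7
      have hw2 : pvSl cs1 (p1 + 7) (p1 + 8) = pvSl cs2 (p2 + 7) (p2 + 8) := hsl 7 8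
      rw [hw1, hw2]
      by_cases hw : pvSl cs2 (p2 + 1) (p2 + 7) = "\\citep".toList ∧
          pvSl cs2 (p2 + 7) (p2 + 8) = ['{']
      · simp only [if_pos hw]
        have hb1 : pvBraceScan cs1 (cs1.length + 1) (p1 + 8) 1 =
            (p1 + (pvBraceScan (cs2.drop p2) (cs2.length + 1) 8 1).1, (pvBraceScan (cs2.drop p2) (cs2.length + 1) 8 1).2) := by
          rw [pvBraceScan_drop, hd,
            pvBraceScan_fuel (cs2.drop p2) (cs1.length + 1) (cs2.length + 1) 8 1
              (by simp; omega) (by simp; omega)]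
        have hb2 : pvBraceScan cs2 (cs2.length + 1) (p2 + 8) 1 =
            (p2 + (pvBraceScan (cs2.drop p2) (cs2.length + 1) 8 1).1, (pvBraceScan (cs2.drop p2) (cs2.length + 1) 8 1).2) :=
          pvBraceScan_drop cs2 (cs2.length + 1) p2 8 1
        rw [hb1, hb2]
        have hr8 : 8 ≤ (pvBraceScan (cs2.drop p2) (cs2.length + 1) 8 1).1 := pvBraceScan_ge (cs2.drop p2) (cs2.length + 1) 8 1
        by_cases hk : (pvBraceScan (cs2.drop p2) (cs2.length + 1) 8 1).2 = 0 ∧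
            p2 + (pvBraceScan (cs2.drop p2) (cs2.length + 1) 8 1).1 < cs2.length ∧
            cs2.getD (p2 + (pvBraceScan (cs2.drop p2) (cs2.length + 1) 8 1).1) ' ' = cl
        · have hk1 : (pvBraceScan (cs2.drop p2) (cs2.length + 1) 8 1).2 = 0 ∧
              p1 + (pvBraceScan (cs2.drop p2) (cs2.length + 1) 8 1).1 < cs1.length ∧
              cs1.getD (p1 + (pvBraceScan (cs2.drop p2) (cs2.length + 1) 8 1).1) ' ' = cl :=
            ⟨hk.1, by omega, by rw [hg]; exact hk.2.2⟩
          rw [if_pos hk1, if_pos hk]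
          have hd'' : cs1.drop (p1 + ((pvBraceScan (cs2.drop p2) (cs2.length + 1) 8 1).1 + 1)) =
              cs2.drop (p2 + ((pvBraceScan (cs2.drop p2) (cs2.length + 1) 8 1).1 + 1)) := by
            have hc := congrArg (List.drop ((pvBraceScan (cs2.drop p2) (cs2.length + 1) 8 1).1 + 1)) hd
            rw [List.drop_drop, List.drop_drop] at hc
            exact hc
          have hrec := pvLoopB_congr f cs1 (p1 + ((pvBraceScan (cs2.drop p2) (cs2.length + 1) 8 1).1 + 1))
            cs2 (p2 + ((pvBraceScan (cs2.drop p2) (cs2.length + 1) 8 1).1 + 1)) hd'' (by omega)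
          rw [pvSl_self, pvSl_self]
          rw [show p1 + (pvBraceScan (cs2.drop p2) (cs2.length + 1) 8 1).1 + 1 =
            p1 + ((pvBraceScan (cs2.drop p2) (cs2.length + 1) 8 1).1 + 1) by omega,
            show p2 + (pvBraceScan (cs2.drop p2) (cs2.length + 1) 8 1).1 + 1 =
            p2 + ((pvBraceScan (cs2.drop p2) (cs2.length + 1) 8 1).1 + 1) by omega, hrec, hsl 1 _]
        · have hk1 : ¬ ((pvBraceScan (cs2.drop p2) (cs2.length + 1) 8 1).2 = 0 ∧
              p1 + (pvBraceScan (cs2.drop p2) (cs2.length + 1) 8 1).1 < cs1.length ∧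
              cs1.getD (p1 + (pvBraceScan (cs2.drop p2) (cs2.length + 1) 8 1).1) ' ' = cl) := by
            intro hc
            exact hk ⟨hc.1, by omega, by rw [← hg]; exact hc.2.2⟩
          rw [if_neg hk1, if_neg hk]
          rw [pvLoopB_prefix f cs1 p1 (p1 + 1) (by omega) (by omega) (by omega),
            pvLoopB_prefix f cs2 p2 (p2 + 1) (by omega) (by omega) (by omega)]
          have hone : pvSl cs1 p1 (p1 + 1) = pvSl cs2 p2 (p2 + 1) := by
            have := hsl 0 1
            simpa using this
          rw [hone, pvLoopB_congr f cs1 (p1 + 1) cs2 (p2 + 1) hd' (by omega)]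
      · simp only [if_neg hw]
        rw [pvLoopB_prefix f cs1 p1 (p1 + 1) (by omega) (by omega) (by omega),
          pvLoopB_prefix f cs2 p2 (p2 + 1) (by omega) (by omega) (by omega)]
        have hone : pvSl cs1 p1 (p1 + 1) = pvSl cs2 p2 (p2 + 1) := by
          have := hsl 0 1
          simpa using this
        rw [hone, pvLoopB_congr f cs1 (p1 + 1) cs2 (p2 + 1) hd' (by omega)]
  · have h2 : ¬ p2 < cs2.length := by omega
    rw [pvLoopB_succ, pvLoopB_succ, if_neg h1, if_neg h2]
    rw [pvSl_nil cs1 _ _ (by omega), pvSl_nil cs2 _ _ (by omega)]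
termination_by f
decreasing_by all_goals omega


theorem pv_main (fA fB : Nat) (cs : List Char) (i : Nat) (h : i ≤ cs.length)
    (hfA : cs.length - i < fA) (hfB : cs.length - i < fB) :
    pvLoopA cs fA i = cs.take i ++ pvLoopB cs fB i i := by
  obtain ⟨fA, rfl⟩ : ∃ f', fA = f' + 1 := ⟨fA - 1, by omega⟩
  obtain ⟨fB, rfl⟩ : ∃ f', fB = f' + 1 := ⟨fB - 1, by omega⟩
  have hsplitParen : "(\\citep".toList = '(' :: "\\citep".toList := by decide
  have hsplitBrack : "[\\citep".toList = '[' :: "\\citep".toList := by decide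
  by_cases hi : i < cs.length
  · have hIH1 : pvLoopA cs fA (i + 1) = cs.take (i + 1) ++ pvLoopB cs fB (i + 1) (i + 1) :=
      pv_main fA fB cs (i + 1) (by omega) (by omega) (by omega)
    have glue : pvLoopB cs (fB + 1) i i = pvLoopB cs fB i (i + 1) →
        pvLoopA cs (fA + 1) i = pvLoopA cs fA (i + 1) →
        pvLoopA cs (fA + 1) i = cs.take i ++ pvLoopB cs (fB + 1) i i := by
      intro hB hA
      rw [hA, hIH1, hB, pvLoopB_prefix fB cs i (i + 1) (by omega) (by omega) (by omega),
        pvTake_succ cs i hi, pvSl_singleton cs i hi, List.append_assoc]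
    by_cases hp : cs.getD i ' ' = '('
    · -- opener '('
      have hclp : pvCloser (cs.getD i ' ') = some ')' := by rw [hp]; rfl
      have hA1iff : pvSl cs i (i + 7) = "(\\citep".toList ↔
          cs.getD i ' ' = '(' ∧ pvSl cs (i + 1) (i + 7) = "\\citep".toList := by
        rw [hsplitParen]
        exact pvWindow_iff cs i hi _ _
      have hA2f : ¬ pvSl cs i (i + 7) = "[\\citep".toList := by
        intro hcon
        rw [hsplitBrack, pvWindow_iff cs i hi _ _] at hcon
        rw [hp] at hcon
        exact absurd hcon.1 (by decide)
      by_cases hw : pvSl cs (i + 1) (i + 7) = "\\citep".toList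
      · by_cases h7 : i + 7 < cs.length ∧ cs.getD (i + 7) ' ' = '{'
        · by_cases hk : (pvBraceScan cs (cs.length + 1) (i + 8) 1).2 = 0 ∧
              (pvBraceScan cs (cs.length + 1) (i + 8) 1).1 < cs.length ∧
              cs.getD (pvBraceScan cs (cs.length + 1) (i + 8) 1).1 ' ' = ')'
          · -- the removal case
            have h9 : i + 8 < (pvBraceScan cs (cs.length + 1) (i + 8) 1).1 :=
              pvBraceScan_pos cs (cs.length + 1) (i + 8) 1 (by omega) hk.1
            have hklen : (pvBraceScan cs (cs.length + 1) (i + 8) 1).1 < cs.length := hk.2.1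
            have hlast : cs.getD ((pvBraceScan cs (cs.length + 1) (i + 8) 1).1 - 1) ' ' = '}' :=
              pvBraceScan_last cs (cs.length + 1) (i + 8) 1 (by omega) hk.1
            have hseven : pvSl cs (i + 1) (i + 8) = "\\citep{".toList := by
              rw [pvSl_split cs (i + 1) (i + 7) (i + 8) (by omega) (by omega), hw,
                (pvBrace_iff cs i).mpr h7]
              decide
            have hrepl : "\\citep{".toList ++ pvSl cs (i + 8) ((pvBraceScan cs (cs.length + 1) (i + 8) 1).1 - 1)
                ++ ['}'] = pvSl cs (i + 1) (pvBraceScan cs (cs.length + 1) (i + 8) 1).1 := by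
              rw [pvSl_split cs (i + 1) (i + 8) (pvBraceScan cs (cs.length + 1) (i + 8) 1).1 (by omega)
                  (by omega),
                pvSl_split cs (i + 8) ((pvBraceScan cs (cs.length + 1) (i + 8) 1).1 - 1)
                  (pvBraceScan cs (cs.length + 1) (i + 8) 1).1 (by omega) (by omega), hseven,
                pvSl_last cs (pvBraceScan cs (cs.length + 1) (i + 8) 1).1 (by omega) (by omega), hlast,
                List.append_assoc]
            have h7len : ("\\citep{".toList).length = 7 := by decide
            have hkeylen : (pvSl cs (i + 8) ((pvBraceScan cs (cs.length + 1) (i + 8) 1).1 - 1)).length =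
                (pvBraceScan cs (cs.length + 1) (i + 8) 1).1 - 1 - (i + 8) :=
              pvSl_length cs (i + 8) _ (by omega)
            have hrec := pv_main fA fB
              (cs.take i ++ ("\\citep{".toList ++ pvSl cs (i + 8)
                ((pvBraceScan cs (cs.length + 1) (i + 8) 1).1 - 1) ++ ['}']) ++
                cs.drop ((pvBraceScan cs (cs.length + 1) (i + 8) 1).1 + 1))
              (i + ("\\citep{".toList ++ pvSl cs (i + 8)
                ((pvBraceScan cs (cs.length + 1) (i + 8) 1).1 - 1) ++ ['}']).length)
              (by
                simp only [List.length_append, List.length_take, List.length_drop,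
                  List.length_cons]
                omega)
              (by
                simp only [List.length_append, List.length_take, List.length_drop,
                  List.length_cons]
                omega)
              (by
                simp only [List.length_append, List.length_take, List.length_drop,
                  List.length_cons]
                omega)
            have htake : (cs.take i ++ ("\\citep{".toList ++ pvSl cs (i + 8)
                ((pvBraceScan cs (cs.length + 1) (i + 8) 1).1 - 1) ++ ['}']) ++
                cs.drop ((pvBraceScan cs (cs.length + 1) (i + 8) 1).1 + 1)).take
                (i + ("\\citep{".toList ++ pvSl cs (i + 8)
                ((pvBraceScan cs (cs.length + 1) (i + 8) 1).1 - 1) ++ ['}']).length) =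
                cs.take i ++ ("\\citep{".toList ++ pvSl cs (i + 8)
                ((pvBraceScan cs (cs.length + 1) (i + 8) 1).1 - 1) ++ ['}']) :=
              List.take_left' (by
                simp only [List.length_append, List.length_take, List.length_cons]
                omega)
            have hdrop : (cs.take i ++ ("\\citep{".toList ++ pvSl cs (i + 8)
                ((pvBraceScan cs (cs.length + 1) (i + 8) 1).1 - 1) ++ ['}']) ++
                cs.drop ((pvBraceScan cs (cs.length + 1) (i + 8) 1).1 + 1)).drop
                (i + ("\\citep{".toList ++ pvSl cs (i + 8)
                ((pvBraceScan cs (cs.length + 1) (i + 8) 1).1 - 1) ++ ['}']).length) =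
                cs.drop ((pvBraceScan cs (cs.length + 1) (i + 8) 1).1 + 1) :=
              List.drop_left' (by
                simp only [List.length_append, List.length_take, List.length_cons]
                omega)
            have hcongr := pvLoopB_congr fB
              (cs.take i ++ ("\\citep{".toList ++ pvSl cs (i + 8)
                ((pvBraceScan cs (cs.length + 1) (i + 8) 1).1 - 1) ++ ['}']) ++
                cs.drop ((pvBraceScan cs (cs.length + 1) (i + 8) 1).1 + 1))
              (i + ("\\citep{".toList ++ pvSl cs (i + 8)
                ((pvBraceScan cs (cs.length + 1) (i + 8) 1).1 - 1) ++ ['}']).length)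
              cs ((pvBraceScan cs (cs.length + 1) (i + 8) 1).1 + 1) (by rw [hdrop])
                (by simp only [List.length_append, List.length_take, List.length_drop, List.length_cons]; omega)
            have hBi : pvLoopB cs (fB + 1) i i = pvSl cs i i ++
                pvSl cs (i + 1) (pvBraceScan cs (cs.length + 1) (i + 8) 1).1 ++
                pvLoopB cs fB ((pvBraceScan cs (cs.length + 1) (i + 8) 1).1 + 1)
                  ((pvBraceScan cs (cs.length + 1) (i + 8) 1).1 + 1) := by
              rw [pvLoopB_succ, if_pos hi]
              simp only [hclp, if_pos (And.intro hw ((pvBrace_iff cs i).mpr h7))]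
              rw [if_pos hk]
            rw [pvLoopA_succ, if_pos hi, if_pos (hA1iff.mpr ⟨hp, hw⟩)]
            simp only [if_pos h7]
            rw [if_pos hk, hrec, htake, hcongr, hBi, hrepl]
            simp [pvSl_self]
          · refine glue ?_ ?_
            · rw [pvLoopB_succ, if_pos hi]
              simp only [hclp, if_pos (And.intro hw ((pvBrace_iff cs i).mpr h7))]
              rw [if_neg hk]
            · rw [pvLoopA_succ, if_pos hi, if_pos (hA1iff.mpr ⟨hp, hw⟩)]
              simp only [if_pos h7]
              rw [if_neg hk]
        · refine glue ?_ ?_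
          · rw [pvLoopB_succ, if_pos hi]
            simp only [hclp,
              if_neg (show ¬ (pvSl cs (i + 1) (i + 7) = "\\citep".toList ∧
                pvSl cs (i + 7) (i + 8) = ['{']) from
                fun hc => h7 ((pvBrace_iff cs i).mp hc.2))]
          · rw [pvLoopA_succ, if_pos hi, if_pos (hA1iff.mpr ⟨hp, hw⟩), if_neg h7]
      · refine glue ?_ ?_
        · rw [pvLoopB_succ, if_pos hi]
          simp only [hclp,
            if_neg (show ¬ (pvSl cs (i + 1) (i + 7) = "\\citep".toList ∧
              pvSl cs (i + 7) (i + 8) = ['{']) from fun hc => hw hc.1)]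
        · rw [pvLoopA_succ, if_pos hi,
            if_neg (show ¬ pvSl cs i (i + 7) = "(\\citep".toList from
              fun hc => hw (hA1iff.mp hc).2), if_neg hA2f]
    · by_cases hq : cs.getD i ' ' = '['
      · -- opener '['
        have hclq : pvCloser (cs.getD i ' ') = some ']' := by rw [hq]; rfl
        have hA2iff : pvSl cs i (i + 7) = "[\\citep".toList ↔
            cs.getD i ' ' = '[' ∧ pvSl cs (i + 1) (i + 7) = "\\citep".toList := by
          rw [hsplitBrack]
          exact pvWindow_iff cs i hi _ _
        have hA1f : ¬ pvSl cs i (i + 7) = "(\\citep".toList := by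
          intro hcon
          rw [hsplitParen, pvWindow_iff cs i hi _ _] at hcon
          exact hp hcon.1
        by_cases hw : pvSl cs (i + 1) (i + 7) = "\\citep".toList
        · by_cases h7 : i + 7 < cs.length ∧ cs.getD (i + 7) ' ' = '{'
          · by_cases hk : (pvBraceScan cs (cs.length + 1) (i + 8) 1).2 = 0 ∧
                (pvBraceScan cs (cs.length + 1) (i + 8) 1).1 < cs.length ∧
                cs.getD (pvBraceScan cs (cs.length + 1) (i + 8) 1).1 ' ' = ']'
            · have h9 : i + 8 < (pvBraceScan cs (cs.length + 1) (i + 8) 1).1 :=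
                pvBraceScan_pos cs (cs.length + 1) (i + 8) 1 (by omega) hk.1
              have hklen : (pvBraceScan cs (cs.length + 1) (i + 8) 1).1 < cs.length := hk.2.1
              have hlast : cs.getD ((pvBraceScan cs (cs.length + 1) (i + 8) 1).1 - 1) ' ' = '}' :=
                pvBraceScan_last cs (cs.length + 1) (i + 8) 1 (by omega) hk.1
              have hseven : pvSl cs (i + 1) (i + 8) = "\\citep{".toList := by
                rw [pvSl_split cs (i + 1) (i + 7) (i + 8) (by omega) (by omega), hw,
                  (pvBrace_iff cs i).mpr h7]
                decide
              have hrepl : "\\citep{".toList ++ pvSl cs (i + 8)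
                  ((pvBraceScan cs (cs.length + 1) (i + 8) 1).1 - 1)
                  ++ ['}'] = pvSl cs (i + 1) (pvBraceScan cs (cs.length + 1) (i + 8) 1).1 := by
                rw [pvSl_split cs (i + 1) (i + 8) (pvBraceScan cs (cs.length + 1) (i + 8) 1).1 (by omega)
                    (by omega),
                  pvSl_split cs (i + 8) ((pvBraceScan cs (cs.length + 1) (i + 8) 1).1 - 1)
                    (pvBraceScan cs (cs.length + 1) (i + 8) 1).1 (by omega) (by omega), hseven,
                  pvSl_last cs (pvBraceScan cs (cs.length + 1) (i + 8) 1).1 (by omega) (by omega), hlast,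
                  List.append_assoc]
              have h7len : ("\\citep{".toList).length = 7 := by decide
              have hkeylen : (pvSl cs (i + 8) ((pvBraceScan cs (cs.length + 1) (i + 8) 1).1 - 1)).length =
                  (pvBraceScan cs (cs.length + 1) (i + 8) 1).1 - 1 - (i + 8) :=
                pvSl_length cs (i + 8) _ (by omega)
              have hrec := pv_main fA fB
                (cs.take i ++ ("\\citep{".toList ++ pvSl cs (i + 8)
                  ((pvBraceScan cs (cs.length + 1) (i + 8) 1).1 - 1) ++ ['}']) ++
                  cs.drop ((pvBraceScan cs (cs.length + 1) (i + 8) 1).1 + 1))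
                (i + ("\\citep{".toList ++ pvSl cs (i + 8)
                  ((pvBraceScan cs (cs.length + 1) (i + 8) 1).1 - 1) ++ ['}']).length)
                (by
                  simp only [List.length_append, List.length_take, List.length_drop,
                    List.length_cons]
                  omega)
                (by
                  simp only [List.length_append, List.length_take, List.length_drop,
                    List.length_cons]
                  omega)
                (by
                  simp only [List.length_append, List.length_take, List.length_drop,
                    List.length_cons]
                  omega)
              have htake : (cs.take i ++ ("\\citep{".toList ++ pvSl cs (i + 8)
                  ((pvBraceScan cs (cs.length + 1) (i + 8) 1).1 - 1) ++ ['}']) ++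
                  cs.drop ((pvBraceScan cs (cs.length + 1) (i + 8) 1).1 + 1)).take
                  (i + ("\\citep{".toList ++ pvSl cs (i + 8)
                  ((pvBraceScan cs (cs.length + 1) (i + 8) 1).1 - 1) ++ ['}']).length) =
                  cs.take i ++ ("\\citep{".toList ++ pvSl cs (i + 8)
                  ((pvBraceScan cs (cs.length + 1) (i + 8) 1).1 - 1) ++ ['}']) :=
                List.take_left' (by
                  simp only [List.length_append, List.length_take, List.length_cons]
                  omega)
              have hdrop : (cs.take i ++ ("\\citep{".toList ++ pvSl cs (i + 8)
                  ((pvBraceScan cs (cs.length + 1) (i + 8) 1).1 - 1) ++ ['}']) ++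
                  cs.drop ((pvBraceScan cs (cs.length + 1) (i + 8) 1).1 + 1)).drop
                  (i + ("\\citep{".toList ++ pvSl cs (i + 8)
                  ((pvBraceScan cs (cs.length + 1) (i + 8) 1).1 - 1) ++ ['}']).length) =
                  cs.drop ((pvBraceScan cs (cs.length + 1) (i + 8) 1).1 + 1) :=
                List.drop_left' (by
                  simp only [List.length_append, List.length_take, List.length_cons]
                  omega)
              have hcongr := pvLoopB_congr fB
                (cs.take i ++ ("\\citep{".toList ++ pvSl cs (i + 8)
                  ((pvBraceScan cs (cs.length + 1) (i + 8) 1).1 - 1) ++ ['}']) ++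
                  cs.drop ((pvBraceScan cs (cs.length + 1) (i + 8) 1).1 + 1))
                (i + ("\\citep{".toList ++ pvSl cs (i + 8)
                  ((pvBraceScan cs (cs.length + 1) (i + 8) 1).1 - 1) ++ ['}']).length)
                cs ((pvBraceScan cs (cs.length + 1) (i + 8) 1).1 + 1) (by rw [hdrop])
                (by simp only [List.length_append, List.length_take, List.length_drop, List.length_cons]; omega)
              have hBi : pvLoopB cs (fB + 1) i i = pvSl cs i i ++
                  pvSl cs (i + 1) (pvBraceScan cs (cs.length + 1) (i + 8) 1).1 ++
                  pvLoopB cs fB ((pvBraceScan cs (cs.length + 1) (i + 8) 1).1 + 1)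
                    ((pvBraceScan cs (cs.length + 1) (i + 8) 1).1 + 1) := by
                rw [pvLoopB_succ, if_pos hi]
                simp only [hclq, if_pos (And.intro hw ((pvBrace_iff cs i).mpr h7))]
                rw [if_pos hk]
              rw [pvLoopA_succ, if_pos hi, if_neg hA1f, if_pos (hA2iff.mpr ⟨hq, hw⟩)]
              simp only [if_pos h7]
              rw [if_pos hk, hrec, htake, hcongr, hBi, hrepl]
              simp [pvSl_self]
            · refine glue ?_ ?_
              · rw [pvLoopB_succ, if_pos hi]
                simp only [hclq, if_pos (And.intro hw ((pvBrace_iff cs i).mpr h7))]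
                rw [if_neg hk]
              · rw [pvLoopA_succ, if_pos hi, if_neg hA1f, if_pos (hA2iff.mpr ⟨hq, hw⟩)]
                simp only [if_pos h7]
                rw [if_neg hk]
          · refine glue ?_ ?_
            · rw [pvLoopB_succ, if_pos hi]
              simp only [hclq,
                if_neg (show ¬ (pvSl cs (i + 1) (i + 7) = "\\citep".toList ∧
                  pvSl cs (i + 7) (i + 8) = ['{']) from
                  fun hc => h7 ((pvBrace_iff cs i).mp hc.2))]
            · rw [pvLoopA_succ, if_pos hi, if_neg hA1f, if_pos (hA2iff.mpr ⟨hq, hw⟩),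
                if_neg h7]
        · refine glue ?_ ?_
          · rw [pvLoopB_succ, if_pos hi]
            simp only [hclq,
              if_neg (show ¬ (pvSl cs (i + 1) (i + 7) = "\\citep".toList ∧
                pvSl cs (i + 7) (i + 8) = ['{']) from fun hc => hw hc.1)]
          · rw [pvLoopA_succ, if_pos hi, if_neg hA1f,
              if_neg (show ¬ pvSl cs i (i + 7) = "[\\citep".toList from
                fun hc => hw (hA2iff.mp hc).2)]
      · -- not an opener
        have hcl : pvCloser (cs.getD i ' ') = none := by
          unfold pvCloser
          rw [if_neg hp, if_neg hq]
        have hA1f : ¬ pvSl cs i (i + 7) = "(\\citep".toList := by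
          intro hcon
          rw [hsplitParen, pvWindow_iff cs i hi _ _] at hcon
          exact hp hcon.1
        have hA2f : ¬ pvSl cs i (i + 7) = "[\\citep".toList := by
          intro hcon
          rw [hsplitBrack, pvWindow_iff cs i hi _ _] at hcon
          exact hq hcon.1
        refine glue ?_ ?_
        · rw [pvLoopB_succ, if_pos hi]
          simp only [hcl]
        · rw [pvLoopA_succ, if_pos hi, if_neg hA1f, if_neg hA2f]
  · rw [pvLoopA_succ, if_neg hi]
    conv_rhs => rw [pvLoopB_succ, if_neg hi]
    have hieq : i = cs.length := by omega
    subst hieq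
    rw [pvSl_self, List.take_of_length_le (by omega), List.append_nil]
termination_by fA
decreasing_by all_goals omega


-- ===== VERDICT (by name: the statement is the Claim_ definition above) =====
theorem fix_double_parentheses_spec : Claim_equal_fix_double_parentheses := by
  intro content _
  unfold Spec_fix_double_parentheses fix_double_parentheses fix_double_parentheses_alt
  have := pv_main (content.toList.length + 1) (content.toList.length + 1) content.toList 0
    (by omega) (by omega) (by omega)
  simp at this
  simp [this]
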